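-- pv_equiv track=rewrite | github.com/coderGray1296/NLP | Target_Sentiment_Analysis/TSA/MitchellEtAI/scripts/ConllToErma.py | read_syllables_file
-- ===== SOURCE A (Python) =====
-- def read_syllables_file(syllables_file):
--     onsets = [""]
--     vowels = []
--     codas = [""]
--     for line in syllables_file:
--         if line.startswith("## onsets"):
--             do_onset = True
--             do_vowel = False
--             do_coda = False
--         elif line.startswith("## vowels"):
--             do_onset = False
--             do_vowel = True
--             do_coda = False
--         elif line.startswith("## codas"):
--             do_onset = False
--             do_vowel = False
--             do_coda = True
--         else:
--             if do_onset:
--                 onsets += [line.strip()]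
--             elif do_vowel:
--                 vowels += [line.strip()]
--             elif do_coda:
--                 codas += [line.strip()]
--     return (onsets, vowels, codas)
-- ===== SOURCE B (Python) =====
-- def read_syllables_file(syllables_file):
--     # Phase 1: segment the file: each header opens a segment holding the stripped
--     # data lines up to the next header.
--     def kind_of(line):
--         if line.startswith("## onsets"):
--             return 0
--         if line.startswith("## vowels"):
--             return 1
--         if line.startswith("## codas"):
--             return 2
--         return None
--
--     n = len(syllables_file)
--     segments = []
--     i = 0
--     while i < n:
--         k = kind_of(syllables_file[i])
--         j = i + 1
--         while j < n and kind_of(syllables_file[j]) is None: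
--             j += 1
--         segments.append((k, [l.strip() for l in syllables_file[i + 1:j]]))
--         i = j
--     # Phase 2: pour each segment into its bucket (KeyError if data precedes any header).
--     buckets = {0: [""], 1: [], 2: [""]}
--     for k, xs in segments:
--         buckets[k].extend(xs)
--     return (buckets[0], buckets[1], buckets[2])
-- ===== Notes on version B (the rewrite author's own statement) =====
-- stated objective: alternative
-- what changed: Replaces A's single-pass three-flag state machine with a two-phase algorithm: first cut the file into (header-kind, stripped-block) segments by scanning to each next header line, then pour each segment into its bucket in a dict keyed by kind.
import Mathlib
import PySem

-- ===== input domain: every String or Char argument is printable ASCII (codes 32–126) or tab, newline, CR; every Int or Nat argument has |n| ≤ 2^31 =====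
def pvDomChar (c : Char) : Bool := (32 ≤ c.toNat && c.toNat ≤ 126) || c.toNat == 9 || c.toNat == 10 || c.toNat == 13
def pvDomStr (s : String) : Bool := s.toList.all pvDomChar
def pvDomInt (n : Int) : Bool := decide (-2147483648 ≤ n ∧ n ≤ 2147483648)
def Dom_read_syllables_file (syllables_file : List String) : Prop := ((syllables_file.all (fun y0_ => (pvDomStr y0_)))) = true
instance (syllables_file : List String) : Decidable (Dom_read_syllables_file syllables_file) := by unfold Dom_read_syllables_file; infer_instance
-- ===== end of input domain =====

-- B replaces A's single-pass boolean state machine by a two-phase algorithm (segment the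
-- file at its header lines, then assemble each bucket by concatenating its segments);
-- equivalence of return values on inputs whose first line is a header (elsewhere A raises NameError).

-- ===== PORT A =====
-- A's loop: three lists plus three boolean flags; in Python the flags are UNBOUND until
-- the first header line, so a data line before any header raises NameError — that case is
-- excluded by Pre_; the port models the unbound flags as all-false and skips there.
def pvLoopA : List String → List String → List String → List String → Bool → Bool → Bool → (List String × List String × List String)
  | [], onsets, vowels, codas, _, _, _ => (onsets, vowels, codas)
  | line :: rest, onsets, vowels, codas, dOn, dVo, dCo =>
    if PySem.Str.startswith line "## onsets" then pvLoopA rest onsets vowels codas true false false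
    else if PySem.Str.startswith line "## vowels" then pvLoopA rest onsets vowels codas false true false
    else if PySem.Str.startswith line "## codas" then pvLoopA rest onsets vowels codas false false true
    else if dOn then pvLoopA rest (onsets ++ [PySem.Str.strip line]) vowels codas dOn dVo dCo
    else if dVo then pvLoopA rest onsets (vowels ++ [PySem.Str.strip line]) codas dOn dVo dCo
    else if dCo then pvLoopA rest onsets vowels (codas ++ [PySem.Str.strip line]) dOn dVo dCo
    else pvLoopA rest onsets vowels codas dOn dVo dCo  -- NameError in Python; outside Pre_

def read_syllables_file (syllables_file : List String) : List String × List String × List String :=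
  pvLoopA syllables_file [""] [] [""] false false false

-- ===== PORT B =====
-- B's kind_of: which header (if any) a line is.
def pvKindOf (line : String) : Option Nat :=
  if PySem.Str.startswith line "## onsets" then some 0
  else if PySem.Str.startswith line "## vowels" then some 1
  else if PySem.Str.startswith line "## codas" then some 2
  else none

-- B's outer while loop: each iteration takes the line at i as the segment head and the
-- inner while-scan to the next header (= takeWhile/dropWhile on the remaining lines) as
-- its stripped block, then continues at that header.
def pvSegments : List String → List (Option Nat × List String)
  | [] => []
  | line :: rest =>
    (pvKindOf line, (rest.takeWhile (fun l => (pvKindOf l).isNone)).map PySem.Str.strip)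
      :: pvSegments (rest.dropWhile (fun l => (pvKindOf l).isNone))
termination_by ls => ls.length
decreasing_by
  simpa using Nat.lt_succ_of_le (List.length_dropWhile_le _ _)

-- B's phase 2: pour each segment into its bucket, a fold over the segments with
-- the dict {0: onsets, 1: vowels, 2: codas} as the state; a segment of kind none
-- is a KeyError in Python (data before any header) — outside Pre_, the port skips.
def pvFill : List (Option Nat × List String) → List String → List String → List String → (List String × List String × List String)
  | [], b0, b1, b2 => (b0, b1, b2)
  | (some 0, xs) :: rest, b0, b1, b2 => pvFill rest (b0 ++ xs) b1 b2
  | (some 1, xs) :: rest, b0, b1, b2 => pvFill rest b0 (b1 ++ xs) b2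
  | (some 2, xs) :: rest, b0, b1, b2 => pvFill rest b0 b1 (b2 ++ xs)
  | _ :: rest, b0, b1, b2 => pvFill rest b0 b1 b2  -- KeyError in Python; outside Pre_

def read_syllables_file_alt (syllables_file : List String) : List String × List String × List String :=
  pvFill (pvSegments syllables_file) [""] [] [""]

-- ===== PRECONDITION & SPEC =====
-- Pre_ excludes exactly the inputs whose first line is not a section header: there
-- Python A raises NameError (its mode flags are still unbound at the first data line).
def Pre_read_syllables_file (syllables_file : List String) : Prop :=
  syllables_file.head?.all (fun l =>
    PySem.Str.startswith l "## onsets" || PySem.Str.startswith l "## vowels"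
      || PySem.Str.startswith l "## codas") = true

instance (syllables_file : List String) : Decidable (Pre_read_syllables_file syllables_file) := by
  unfold Pre_read_syllables_file; infer_instance

def pvWitness_read_syllables_file : List String := ["## onsets", "a", "## vowels", "i"]

def Spec_read_syllables_file (syllables_file : List String) (out : List String × List String × List String) : Prop := out = read_syllables_file_alt syllables_file
instance (syllables_file : List String) (out : List String × List String × List String) : Decidable (Spec_read_syllables_file syllables_file out) := by unfold Spec_read_syllables_file; infer_instance

-- ===== CLAIM =====
def Claim_equal_read_syllables_file : Prop := ∀ (syllables_file : List String), Dom_read_syllables_file syllables_file → Pre_read_syllables_file syllables_file → Spec_read_syllables_file syllables_file (read_syllables_file syllables_file)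

-- ===== LEMMAS AND PROOFS =====
-- The segments of ls as seen from inside section k: the headerless prefix still
-- belongs to k, then the segments of the rest.
def pvSegsFrom (k : Nat) (ls : List String) : List (Option Nat × List String) :=
  (some k, (ls.takeWhile (fun l => (pvKindOf l).isNone)).map PySem.Str.strip)
    :: pvSegments (ls.dropWhile (fun l => (pvKindOf l).isNone))

-- Loop correspondence: A's single-pass loop in section k equals B's phase-2 fold
-- over the segments of the remaining lines.
theorem pvLoop_eq_segs (ls : List String) : ∀ (k : Nat) (onsets vowels codas : List String), k < 3 →
    pvLoopA ls onsets vowels codas (k == 0) (k == 1) (k == 2)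
      = pvFill (pvSegsFrom k ls) onsets vowels codas := by
  induction ls with
  | nil =>
    intro k onsets vowels codas hk
    interval_cases k <;> simp [pvLoopA, pvSegsFrom, pvSegments, pvFill]
  | cons line rest ih =>
    intro k onsets vowels codas hk
    have e0 : pvLoopA rest onsets vowels codas true false false
        = pvFill (pvSegsFrom 0 rest) onsets vowels codas := ih 0 onsets vowels codas (by omega)
    have e1 : pvLoopA rest onsets vowels codas false true false
        = pvFill (pvSegsFrom 1 rest) onsets vowels codas := ih 1 onsets vowels codas (by omega)
    have e2 : pvLoopA rest onsets vowels codas false false true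
        = pvFill (pvSegsFrom 2 rest) onsets vowels codas := ih 2 onsets vowels codas (by omega)
    have d0 : pvLoopA rest (onsets ++ [PySem.Str.strip line]) vowels codas true false false
        = pvFill (pvSegsFrom 0 rest) (onsets ++ [PySem.Str.strip line]) vowels codas :=
      ih 0 _ vowels codas (by omega)
    have d1 : pvLoopA rest onsets (vowels ++ [PySem.Str.strip line]) codas false true false
        = pvFill (pvSegsFrom 1 rest) onsets (vowels ++ [PySem.Str.strip line]) codas :=
      ih 1 onsets _ codas (by omega)
    have d2 : pvLoopA rest onsets vowels (codas ++ [PySem.Str.strip line]) false false true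
        = pvFill (pvSegsFrom 2 rest) onsets vowels (codas ++ [PySem.Str.strip line]) :=
      ih 2 onsets vowels _ (by omega)
    interval_cases k <;>
      (by_cases h0 : PySem.Str.startswith line "## onsets" <;>
       by_cases h1 : PySem.Str.startswith line "## vowels" <;>
       by_cases h2 : PySem.Str.startswith line "## codas" <;>
       simp at h0 h1 h2 <;>
       simp [pvLoopA, pvSegsFrom, pvSegments, pvKindOf, pvFill, h0, h1, h2,
         e0, e1, e2, d0, d1, d2])

-- ===== VERDICT =====
theorem read_syllables_file_spec : Claim_equal_read_syllables_file := by
  intro file _ hpre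
  show read_syllables_file file = read_syllables_file_alt file
  cases file with
  | nil => simp [read_syllables_file, read_syllables_file_alt, pvLoopA, pvSegments, pvFill]
  | cons line rest =>
    have hk : (PySem.Str.startswith line "## onsets" || PySem.Str.startswith line "## vowels"
        || PySem.Str.startswith line "## codas") = true := by
      simpa [Pre_read_syllables_file] using hpre
    have E0 : pvLoopA rest [""] [] [""] true false false
        = pvFill (pvSegsFrom 0 rest) [""] [] [""] := pvLoop_eq_segs rest 0 [""] [] [""] (by omega)
    have E1 : pvLoopA rest [""] [] [""] false true false
        = pvFill (pvSegsFrom 1 rest) [""] [] [""] := pvLoop_eq_segs rest 1 [""] [] [""] (by omega)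
    have E2 : pvLoopA rest [""] [] [""] false false true
        = pvFill (pvSegsFrom 2 rest) [""] [] [""] := pvLoop_eq_segs rest 2 [""] [] [""] (by omega)
    unfold read_syllables_file read_syllables_file_alt
    by_cases h0 : PySem.Str.startswith line "## onsets" <;>
    by_cases h1 : PySem.Str.startswith line "## vowels" <;>
    by_cases h2 : PySem.Str.startswith line "## codas" <;>
    simp at h0 h1 h2 <;>
    first
      | (simp [pvLoopA, pvSegments, pvKindOf, pvFill, pvSegsFrom, h0, h1, h2, E0, E1, E2]; done)
      | simp [h0, h1, h2] at hk
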